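-- pv_equiv track=rewrite | github.com/AwesomeCorp/leash-py | src/leash/handlers/context_injection.py | _extract_recent_errors
-- ===== SOURCE A (Python) =====
-- def _extract_recent_errors(session_context: str) -> str | None:
--     """Pull the last 3 lines containing 'error' or 'failed' from the session context."""
--     error_lines: list[str] = []
--     for line in session_context.splitlines():
--         lower = line.lower()
--         if "error" in lower or "failed" in lower:
--             error_lines.append(line.strip())
--     # Take only the last 3
--     recent = error_lines[-3:]
--     return "; ".join(recent) if recent else None
-- ===== SOURCE B (Python) =====
-- def _extract_recent_errors(session_context: str) -> str | None:
--     """Pull the last 3 lines containing 'error' or 'failed' from the session context."""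
--     buf: list[str] = []
--     for line in reversed(session_context.splitlines()):
--         low = line.lower()
--         if "error" in low or "failed" in low:
--             buf.append(line.strip())
--             if len(buf) == 3:
--                 break
--     if not buf:
--         return None
--     buf.reverse()
--     return "; ".join(buf)
-- ===== Notes on version B (the rewrite author's own statement) =====
-- stated objective: alternative
-- what changed: B scans the lines back-to-front collecting at most 3 stripped matches with an early break, then reverses the small buffer, instead of A's forward accumulation of every match followed by a [-3:] slice.
import Mathlib
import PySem

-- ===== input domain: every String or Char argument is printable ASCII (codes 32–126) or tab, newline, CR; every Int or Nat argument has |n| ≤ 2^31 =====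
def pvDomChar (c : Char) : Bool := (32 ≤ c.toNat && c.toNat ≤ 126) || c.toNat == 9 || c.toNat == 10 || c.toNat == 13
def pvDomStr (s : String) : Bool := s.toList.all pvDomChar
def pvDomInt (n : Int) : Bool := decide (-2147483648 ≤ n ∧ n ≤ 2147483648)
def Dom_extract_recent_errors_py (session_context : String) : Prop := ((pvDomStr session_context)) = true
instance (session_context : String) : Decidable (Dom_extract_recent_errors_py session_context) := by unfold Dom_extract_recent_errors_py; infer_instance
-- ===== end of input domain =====

-- B collects at most 3 matches scanning the lines back-to-front with an early break, then
-- reverses the buffer — instead of A's forward accumulation of all matches plus a [-3:] slice.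

-- ===== PORT A =====
def extract_recent_errors_py (session_context : String) : Option String :=
  let error_lines := (PySem.Str.splitlines session_context).foldl
    (fun acc line =>
      let lower := PySem.Str.lower line
      if PySem.Str.isIn "error" lower || PySem.Str.isIn "failed" lower then
        acc ++ [PySem.Str.strip line]
      else acc) []
  let recent := PySem.List.slice error_lines (some (-3)) none
  if recent ≠ [] then some (PySem.Str.join "; " recent) else none

-- ===== PORT B =====
-- B's loop over the reversed lines: append stripped matches, break as soon as 3 are held.
def pvAltLoop : List String → List String → List String
  | [], buf => buf
  | line :: rest, buf =>
    let low := PySem.Str.lower line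
    if PySem.Str.isIn "error" low || PySem.Str.isIn "failed" low then
      let buf' := buf ++ [PySem.Str.strip line]
      if buf'.length == 3 then buf' else pvAltLoop rest buf'
    else pvAltLoop rest buf

def extract_recent_errors_py_alt (session_context : String) : Option String :=
  let buf := pvAltLoop (PySem.Str.splitlines session_context).reverse []
  if buf = [] then none
  else some (PySem.Str.join "; " buf.reverse)

-- ===== PRECONDITION & SPEC =====
def Spec_extract_recent_errors_py (session_context : String) (out : Option String) : Prop := out = extract_recent_errors_py_alt session_context
instance (session_context : String) (out : Option String) : Decidable (Spec_extract_recent_errors_py session_context out) := by unfold Spec_extract_recent_errors_py; infer_instance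

-- ===== CLAIM (what is proved, stated in full; the proofs are below) =====
def Claim_equal_extract_recent_errors_py : Prop := ∀ (session_context : String), Dom_extract_recent_errors_py session_context → Spec_extract_recent_errors_py session_context (extract_recent_errors_py session_context)

-- ===== LEMMAS AND PROOFS =====

-- the shared line test
def pvMatch (line : String) : Bool :=
  PySem.Str.isIn "error" (PySem.Str.lower line) || PySem.Str.isIn "failed" (PySem.Str.lower line)

-- B's early-break loop computes the first 3 stripped matches of its input (given room in buf)
theorem pvAltLoop_eq (xs : List String) : ∀ buf : List String, buf.length < 3 →
    pvAltLoop xs buf = (buf ++ (xs.filter pvMatch).map PySem.Str.strip).take 3 := by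
  induction xs with
  | nil =>
    intro buf h
    simp [pvAltLoop, List.take_of_length_le (Nat.le_of_lt h)]
  | cons line rest ih =>
    intro buf h
    simp only [pvAltLoop, pvMatch, List.filter_cons]
    split
    · rename_i hp
      by_cases h3 : (buf ++ [PySem.Str.strip line]).length = 3
      · simp only [h3, beq_self_eq_true, if_true]
        rw [List.map_cons, show buf ++ PySem.Str.strip line :: (rest.filter pvMatch).map PySem.Str.strip
              = (buf ++ [PySem.Str.strip line]) ++ (rest.filter pvMatch).map PySem.Str.strip by simp,
            List.take_left' h3]
      · have hlt : (buf ++ [PySem.Str.strip line]).length < 3 := by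
          simp at h3 ⊢; omega
        rw [if_neg (by simpa using h3)]
        rw [ih _ hlt]
        simp
    · rename_i hp
      exact ih buf h

-- the generic last-3 / reversed-first-3 identity
theorem pvDropLast3 (l : List String) :
    l.drop (l.length - 3) = (l.reverse.take 3).reverse := by
  rw [List.take_reverse, List.reverse_reverse]

theorem extract_recent_errors_py_eq (s : String) :
    extract_recent_errors_py s = extract_recent_errors_py_alt s := by
  unfold extract_recent_errors_py extract_recent_errors_py_alt
  have hfold : (PySem.Str.splitlines s).foldl
      (fun acc line =>
        let lower := PySem.Str.lower line
        if PySem.Str.isIn "error" lower || PySem.Str.isIn "failed" lower then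
          acc ++ [PySem.Str.strip line]
        else acc) []
      = ((PySem.Str.splitlines s).filter pvMatch).map PySem.Str.strip := by
    rw [show (fun (acc : List String) line =>
          let lower := PySem.Str.lower line
          if PySem.Str.isIn "error" lower || PySem.Str.isIn "failed" lower then
            acc ++ [PySem.Str.strip line]
          else acc)
        = (fun acc line => if pvMatch line then acc ++ [PySem.Str.strip line] else acc) from rfl,
      PySem.List.foldl_append_if pvMatch PySem.Str.strip, List.nil_append]
  have hloop := pvAltLoop_eq (PySem.Str.splitlines s).reverse [] (by simp)
  have hs := PySem.List.slice_from_neg_natCast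
      (xs := ((PySem.Str.splitlines s).filter pvMatch).map PySem.Str.strip) (k := 3) (by norm_num)
  norm_num at hs
  rw [show ((PySem.Str.splitlines s).filter pvMatch).length
        = (((PySem.Str.splitlines s).filter pvMatch).map PySem.Str.strip).length by simp,
      pvDropLast3] at hs
  simp only [hfold, hloop, List.nil_append, List.filter_reverse, List.map_reverse, hs]
  by_cases hnil : ((((PySem.Str.splitlines s).filter pvMatch).map PySem.Str.strip).reverse.take 3) = []
  · simp [hnil]
  · simp [hnil]

-- ===== VERDICT (by name: the statement is the Claim_ definition above) =====
theorem extract_recent_errors_py_spec : Claim_equal_extract_recent_errors_py := by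
  intro s _
  exact extract_recent_errors_py_eq s
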